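-- pv_equiv track=rewrite | github.com/czh513/Deep-Fuzzy-Neural-Networks- | newlogic.bak/utils.py | grouper_variable_length
-- ===== SOURCE A (Python) =====
-- def grouper_variable_length(iterable, n):
--     "Collect data into variable-length chunks or blocks"
--     # grouper('ABCDEFG', 3) --> ABC DEF G"
--     block = []
--     for val in iterable:
--         block.append(val)
--         if len(block) >= n:
--             yield block
--             block = []
--     if len(block) >= 1:
--         yield block
-- ===== SOURCE B (Python) =====
-- def grouper_variable_length(iterable, n):
--     "Collect data into variable-length chunks or blocks"
--     it = iter(iterable)
--     while True:
--         block = [x for _, x in zip(range(n), it)]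
--         if not block:
--             return
--         yield block
-- ===== Notes on version B (the rewrite author's own statement) =====
-- stated objective: idiomatic
-- what changed: B drives an explicit iterator and pulls each chunk in bulk (n items via zip(range(n), it)) instead of appending element by element and testing len(block) >= n after every append, with the trailing-partial-chunk yield disappearing into the main loop.
-- outside the precondition, e.g. on grouper_variable_length([1, 2], 0): A returns [[1], [2]], B returns []; on grouper_variable_length([1, 2], -1): A returns [[1], [2]], B returns []
import Mathlib
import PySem

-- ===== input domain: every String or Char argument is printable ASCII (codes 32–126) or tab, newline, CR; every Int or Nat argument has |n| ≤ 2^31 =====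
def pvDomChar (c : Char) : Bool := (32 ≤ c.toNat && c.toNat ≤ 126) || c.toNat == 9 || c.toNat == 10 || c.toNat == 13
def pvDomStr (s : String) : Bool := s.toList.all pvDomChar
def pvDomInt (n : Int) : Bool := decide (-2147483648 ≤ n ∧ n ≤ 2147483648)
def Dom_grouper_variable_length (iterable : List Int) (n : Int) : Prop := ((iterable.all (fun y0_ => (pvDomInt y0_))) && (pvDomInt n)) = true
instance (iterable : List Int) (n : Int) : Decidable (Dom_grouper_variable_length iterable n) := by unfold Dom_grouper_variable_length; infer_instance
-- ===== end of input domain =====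

-- B pulls each chunk in bulk from an explicit iterator instead of appending element by element;
-- idiomatic restructuring, same return value on every input with chunk size n ≥ 1.

-- ===== PORT A =====
-- the for-loop of A with its (block) accumulator state; the final 'if len(block) >= 1: yield block'
-- is the base case on the exhausted iterable
def pvALoop (n : Int) : List Int → List Int → List (List Int)
  | block, [] => if (1 : Int) ≤ (block.length : Int) then [block] else []
  | block, val :: rest =>
    let block' := block ++ [val]
    if n ≤ (block'.length : Int) then block' :: pvALoop n [] rest
    else pvALoop n block' rest

def grouper_variable_length (iterable : List Int) (n : Int) : List (List Int) :=
  pvALoop n [] iterable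

-- ===== PORT B =====
-- each pass of Source B's 'while True' takes min(n, remaining) items (zip(range(n), it)) as one block;
-- an empty block (iterator exhausted, or n ≤ 0 so range(n) is empty) ends the loop
def pvBLoop (k : Nat) : List Int → List (List Int)
  | [] => []
  | x :: xs =>
    match k with
    | 0 => []
    | k' + 1 => (x :: xs.take k') :: pvBLoop k (xs.drop k')
termination_by xs => xs.length
decreasing_by simp

def grouper_variable_length_alt (iterable : List Int) (n : Int) : List (List Int) :=
  pvBLoop n.toNat iterable

-- ===== PRECONDITION & SPEC =====
-- Pre_ excludes the degenerate chunk sizes n ≤ 0, on which A's per-element test 'len(block) >= n'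
-- accidentally fires after every append (emitting singletons) while B's bulk take of n items is
-- empty and ends immediately; neither value is a specified chunking for n ≤ 0.
def Pre_grouper_variable_length (iterable : List Int) (n : Int) : Prop := 1 ≤ n
instance (iterable : List Int) (n : Int) : Decidable (Pre_grouper_variable_length iterable n) := by unfold Pre_grouper_variable_length; infer_instance

def pvWitness_grouper_variable_length : List Int × Int := ([1, 2, 3, 4, 5], 2)

def Spec_grouper_variable_length (iterable : List Int) (n : Int) (out : List (List Int)) : Prop := out = grouper_variable_length_alt iterable n
instance (iterable : List Int) (n : Int) (out : List (List Int)) : Decidable (Spec_grouper_variable_length iterable n out) := by unfold Spec_grouper_variable_length; infer_instance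

-- ===== CLAIM (what is proved, stated in full; the proofs are below) =====
def Claim_equal_grouper_variable_length : Prop := ∀ (iterable : List Int) (n : Int), Dom_grouper_variable_length iterable n → Pre_grouper_variable_length iterable n → Spec_grouper_variable_length iterable n (grouper_variable_length iterable n)

-- ===== LEMMAS AND PROOFS =====

@[simp] lemma pvBLoop_nil (k : Nat) : pvBLoop k [] = [] := by rw [pvBLoop.eq_def]

@[simp] lemma pvBLoop_cons_succ (k' : Nat) (x : Int) (xs : List Int) :
    pvBLoop (k' + 1) (x :: xs) = (x :: xs.take k') :: pvBLoop (k' + 1) (xs.drop k') := by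
  rw [pvBLoop.eq_def]

-- unfolding equation for B's loop when the chunk size is positive
lemma pvBLoop_pos (k : Nat) (hk : 1 ≤ k) (ys : List Int) :
    pvBLoop k ys = if ys = [] then [] else ys.take k :: pvBLoop k (ys.drop k) := by
  cases ys with
  | nil => simp
  | cons y ys' =>
    obtain ⟨k', rfl⟩ : ∃ k', k = k' + 1 := ⟨k - 1, by omega⟩
    simp

-- invariant of A's loop: with a partial block of length m < n in hand and a nonempty rest,
-- it emits the block completed to n elements and then chunks the remainder as B does
lemma pvALoop_eq (n : Int) (hn : 1 ≤ n) :
    ∀ (xs block : List Int), block.length < n.toNat → xs ≠ [] →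
      pvALoop n block xs =
        (block ++ xs.take (n.toNat - block.length)) ::
          pvBLoop n.toNat (xs.drop (n.toNat - block.length)) := by
  intro xs
  induction xs with
  | nil => intro block _ hne; exact absurd rfl hne
  | cons val rest ih =>
    intro block hb _
    by_cases hy : n ≤ ((block ++ [val]).length : Int)
    · -- the appended element completes the block: block.length + 1 = n
      have hbk : block.length + 1 = n.toNat := by
        simp only [List.length_append, List.length_cons, List.length_nil] at hy; omega
      have h1 : n.toNat - block.length = 1 := by omega
      simp only [pvALoop, if_pos hy, h1, List.take_succ_cons, List.take_zero,
        List.drop_succ_cons, List.drop_zero]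
      have htail : pvALoop n [] rest = pvBLoop n.toNat rest := by
        by_cases hr : rest = []
        · subst hr; simp [pvALoop]
        · rw [ih [] (by simp; omega) hr, pvBLoop_pos n.toNat (by omega) rest, if_neg hr]
          simp
      rw [htail]
    · -- block stays partial
      have hbk : block.length + 1 < n.toNat := by
        simp only [List.length_append, List.length_cons, List.length_nil] at hy; omega
      simp only [pvALoop, if_neg hy]
      by_cases hr : rest = []
      · subst hr
        rw [pvALoop]
        have hlen : (1 : Int) ≤ (((block ++ [val]).length : Nat) : Int) := by simp
        rw [if_pos hlen]
        have ht : List.take (n.toNat - block.length) [val] = [val] :=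
          List.take_of_length_le (by simp; omega)
        have hd : List.drop (n.toNat - block.length) [val] = [] :=
          List.drop_eq_nil_of_le (by simp; omega)
        simp [ht, hd]
      · rw [ih (block ++ [val]) (by simp; omega) hr]
        have h2 : n.toNat - block.length = (n.toNat - (block ++ [val]).length) + 1 := by
          simp; omega
        rw [h2]
        simp [List.take_succ_cons, List.drop_succ_cons]

-- ===== VERDICT (by name: the statement is the Claim_ definition above) =====
theorem grouper_variable_length_spec : Claim_equal_grouper_variable_length := by
  intro iterable n _ hpre
  have hn : (1 : Int) ≤ n := hpre
  unfold Spec_grouper_variable_length grouper_variable_length grouper_variable_length_alt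
  cases iterable with
  | nil => simp [pvALoop]
  | cons x xs =>
    rw [pvALoop_eq n hn (x :: xs) [] (by simp; omega) (by simp),
        pvBLoop_pos n.toNat (by omega) (x :: xs)]
    simp
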